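-- pv_equiv track=rewrite | github.com/Shashank-1234/Route_Optimisation_ | Algo/aco_algo.py | extract_vrp_solution
-- ===== SOURCE A (Python) =====
-- def extract_vrp_solution(P, customers):
--     n = len(customers)
--     trips = []
--     j = n
--     while j > 0:
--         i = P[j]
--         trip = customers[i:j]  # Extract the trip between customers i and j
--         trips.append(trip)
--         j = i
--     return trips
-- ===== SOURCE B (Python) =====
-- def extract_vrp_solution(P, customers):
--     n = len(customers)
--     if n == 0:
--         return []
--     starts = [False] * n
--     j = P[n]
--     while j > 0:
--         starts[j] = True
--         j = P[j]
--     trips = []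
--     cur = []
--     for k, c in enumerate(customers):
--         if starts[k]:
--             trips.append(cur)
--             cur = [c]
--         else:
--             cur.append(c)
--     trips.append(cur)
--     trips.reverse()
--     return trips
-- ===== Notes on version B (the rewrite author's own statement) =====
-- stated objective: alternative
-- what changed: Replaces A's backward slice-and-append chain walk by a marking pass that records trip-start indices in a boolean array and a single forward element-by-element grouping scan over customers (no slicing), with the trip list reversed at the end.
-- outside the precondition, e.g. on extract_vrp_solution([0, 0, -1], [5, 6]): A returns [[6]], B returns [[5, 6]]; on extract_vrp_solution([0, 5, 0], [1, 2]): A returns [[1, 2]], B returns [[1, 2]]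
import Mathlib
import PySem

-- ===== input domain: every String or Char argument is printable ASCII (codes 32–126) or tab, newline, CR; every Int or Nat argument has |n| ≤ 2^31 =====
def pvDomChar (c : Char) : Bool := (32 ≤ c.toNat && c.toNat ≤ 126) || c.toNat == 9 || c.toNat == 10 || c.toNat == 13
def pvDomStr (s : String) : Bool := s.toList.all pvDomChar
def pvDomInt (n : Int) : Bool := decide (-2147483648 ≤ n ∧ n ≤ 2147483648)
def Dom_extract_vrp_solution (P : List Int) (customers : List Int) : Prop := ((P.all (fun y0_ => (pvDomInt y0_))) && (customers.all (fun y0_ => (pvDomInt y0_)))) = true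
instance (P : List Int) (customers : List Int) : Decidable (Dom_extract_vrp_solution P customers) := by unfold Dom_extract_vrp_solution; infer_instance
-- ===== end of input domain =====

-- B replaces A's backward slice-and-append chain walk by a boolean trip-start marking pass plus one forward grouping scan (no slicing), reversed at the end — alternative decomposition, same cost.


-- ===== PORT A =====
-- A's while loop: j := n; while j > 0: i := P[j]; trips.append(customers[i:j]); j := i.
-- Fuel customers.length + 1 suffices under Pre_ (j strictly decreases from n); pyGet? none = IndexError (excluded by Pre_).
def extract_vrp_solution_go (P : List Int) (customers : List Int) : Int → Nat → List (List Int)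
  | _, 0 => []
  | j, fuel + 1 =>
    if j > 0 then
      match PySem.List.pyGet? P j with
      | none => []
      | some i => PySem.List.slice customers (some i) (some j) :: extract_vrp_solution_go P customers i fuel
    else []

def extract_vrp_solution (P : List Int) (customers : List Int) : List (List Int) :=
  extract_vrp_solution_go P customers (customers.length : Int) (customers.length + 1)

-- ===== PORT B =====
-- B's marking loop: j := P[n]; while j > 0: starts[j] := True; j := P[j].
-- Fuel customers.length suffices under Pre_; pyGet? none = IndexError (excluded by Pre_).
def pvMarkGo (P : List Int) : List Bool → Int → Nat → List Bool
  | starts, _, 0 => starts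
  | starts, j, fuel + 1 =>
    if j > 0 then
      match PySem.List.pyGet? P j with
      | none => starts.set j.toNat true
      | some i => pvMarkGo P (starts.set j.toNat true) i fuel
    else starts

-- B's grouping loop: for k, c in enumerate(customers): if starts[k]: close cur, start new; else extend cur.
def pvPartGo (starts : List Bool) : List Int → Nat → List (List Int) → List Int → List (List Int) × List Int
  | [], _, trips, cur => (trips, cur)
  | c :: rest, k, trips, cur =>
    if starts.getD k false then pvPartGo starts rest (k + 1) (trips ++ [cur]) [c]
    else pvPartGo starts rest (k + 1) trips (cur ++ [c])

def extract_vrp_solution_alt (P : List Int) (customers : List Int) : List (List Int) :=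
  let n := customers.length
  if n = 0 then []
  else
    match PySem.List.pyGet? P (n : Int) with
    | none => []  -- Python raises IndexError here, excluded by Pre_
    | some j0 =>
      let starts := pvMarkGo P (List.replicate n false) j0 n
      let r := pvPartGo starts customers 0 [] []
      (r.1 ++ [r.2]).reverse

-- ===== PRECONDITION & SPEC =====
-- Pre_ excludes (a) inputs where A raises IndexError (len(P) ≤ len(customers) with customers nonempty, or an
-- out-of-range chain index) or loops forever (an entry P[k] ≥ k), stated closed-form at every index 1..n, which is
-- slightly stronger than only at the chain indices A actually visits; and (b) predecessor entries strictly between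
-- -n and 0 — garbage values outside the natural predecessor-array domain, where the final trip's start is
-- unspecified: A slices with Python's negative-index wraparound (start n+P[j]) while B starts that trip at 0.
def Pre_extract_vrp_solution (P : List Int) (customers : List Int) : Prop :=
  customers = [] ∨
    (customers.length < P.length ∧
      ∀ k ∈ List.range (customers.length + 1), 0 < k →
        (P.getD k 0 < (k : Int) ∧ (0 ≤ P.getD k 0 ∨ P.getD k 0 + (customers.length : Int) ≤ 0)))
instance (P : List Int) (customers : List Int) : Decidable (Pre_extract_vrp_solution P customers) := by unfold Pre_extract_vrp_solution; infer_instance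

def pvWitness_extract_vrp_solution : List Int × List Int := ([0, 0, 1, 2], [10, 20, 30])

def Spec_extract_vrp_solution (P : List Int) (customers : List Int) (out : List (List Int)) : Prop := out = extract_vrp_solution_alt P customers
instance (P : List Int) (customers : List Int) (out : List (List Int)) : Decidable (Spec_extract_vrp_solution P customers out) := by unfold Spec_extract_vrp_solution; infer_instance

-- ===== CLAIM (what is proved, stated in full; the proofs are below) =====
def Claim_equal_extract_vrp_solution : Prop := ∀ (P : List Int) (customers : List Int), Dom_extract_vrp_solution P customers → Pre_extract_vrp_solution P customers → Spec_extract_vrp_solution P customers (extract_vrp_solution P customers)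

-- ===== LEMMAS AND PROOFS =====

-- The positive prefix of the predecessor chain from j (the indices B's marking loop sets), same fuel pattern as the ports.
def pvPosChain (P : List Int) : Int → Nat → List Nat
  | _, 0 => []
  | j, fuel + 1 =>
    if j > 0 then
      j.toNat :: (match PySem.List.pyGet? P j with
        | some i => pvPosChain P i fuel
        | none => [])
    else []

-- Pure form of B's grouping loop (pvPartGo without the trips accumulator).
def pvPart (starts : List Bool) : List Int → Nat → List Int → List (List Int)
  | [], _, cur => [cur]
  | c :: rest, k, cur =>
    if starts.getD k false then cur :: pvPart starts rest (k + 1) [c]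
    else pvPart starts rest (k + 1) (cur ++ [c])

theorem pvPartGo_eq_part (starts : List Bool) (xs : List Int) : ∀ (k : Nat) (trips : List (List Int)) (cur : List Int),
    (pvPartGo starts xs k trips cur).1 ++ [(pvPartGo starts xs k trips cur).2] = trips ++ pvPart starts xs k cur := by
  induction xs with
  | nil => intro k trips cur; simp [pvPartGo, pvPart]
  | cons c rest ih =>
    intro k trips cur
    simp only [pvPartGo, pvPart]
    by_cases h : starts.getD k false
    · simp only [h, if_true, ih]; simp
    · simp only [h, Bool.false_eq_true, if_false, ih]

theorem pvPosChain_nonpos (P : List Int) (j : Int) (fuel : Nat) (h : j ≤ 0) : pvPosChain P j fuel = [] := by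
  cases fuel <;> simp [pvPosChain]
  omega

-- Chain-progress hypothesis derived from Pre_: every index 1..n0 has an in-range lookup, strictly smaller, natural-sign.
def pvHP (P : List Int) (n0 : Nat) : Prop :=
  ∀ k : Int, 0 < k → k ≤ (n0 : Int) →
    ∃ i, PySem.List.pyGet? P k = some i ∧ i < k ∧ (0 ≤ i ∨ i + (n0 : Int) ≤ 0)

theorem pvChainBound (P : List Int) (n0 : Nat) (hp : pvHP P n0) :
    ∀ fuel (j : Int), 0 < j → j ≤ (n0 : Int) → ∀ m ∈ pvPosChain P j fuel, (m : Int) ≤ j := by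
  intro fuel
  induction fuel with
  | zero => intro j _ _ m hm; simp [pvPosChain] at hm
  | succ fuel ih =>
    intro j hj hjn m hm
    obtain ⟨i, hget, hlt, _⟩ := hp j hj hjn
    simp only [pvPosChain, if_pos hj, hget] at hm
    rcases List.mem_cons.1 hm with h | h
    · subst h; omega
    · by_cases hi : 0 < i
      · have := ih i hi (by omega) m h; omega
      · rw [pvPosChain_nonpos P i fuel (by omega)] at h; simp at h

theorem pvSetGetD (l : List Bool) (n k : Nat) (h : n < l.length) :
    (l.set n true).getD k false = if k = n then true else l.getD k false := by
  by_cases hk : k = n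
  · subst hk; simp [List.getD_eq_getElem?_getD, h]
  · simp [List.getD_eq_getElem?_getD, hk, Ne.symm hk]

theorem pvMarkGo_getD (P : List Int) :
    ∀ (fuel : Nat) (j : Int) (starts : List Bool),
      (∀ m ∈ pvPosChain P j fuel, m < starts.length) →
      ∀ k, (pvMarkGo P starts j fuel).getD k false =
        (starts.getD k false || decide (k ∈ pvPosChain P j fuel)) := by
  intro fuel
  induction fuel with
  | zero => intro j starts _ k; simp [pvMarkGo, pvPosChain]
  | succ fuel ih =>
    intro j starts hlen k
    by_cases hj : j > 0
    · have hjlen : j.toNat < starts.length := by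
        apply hlen; simp only [pvPosChain, if_pos hj]; exact List.mem_cons_self ..
      cases hget : PySem.List.pyGet? P j with
      | none =>
        simp only [pvMarkGo, pvPosChain, if_pos hj, hget]
        rw [pvSetGetD starts j.toNat k hjlen]
        by_cases hk : k = j.toNat <;> simp [hk]
      | some i =>
        simp only [pvMarkGo, pvPosChain, if_pos hj, hget]
        rw [ih i (starts.set j.toNat true) (by
          intro m hm
          rw [List.length_set]
          apply hlen
          simp only [pvPosChain, if_pos hj, hget]
          exact List.mem_cons_of_mem _ hm)]
        rw [pvSetGetD starts j.toNat k hjlen]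
        by_cases hk : k = j.toNat <;> simp [hk]
    · simp [pvMarkGo, pvPosChain, hj]

theorem pvPart_no_marks (starts : List Bool) :
    ∀ (xs : List Int) (k : Nat) (cur : List Int),
      (∀ m, k ≤ m → m < k + xs.length → starts.getD m false = false) →
      pvPart starts xs k cur = [cur ++ xs] := by
  intro xs
  induction xs with
  | nil => intro k cur _; simp [pvPart]
  | cons c rest ih =>
    intro k cur h
    have hk : starts.getD k false = false := h k (le_refl _) (by simp)
    simp only [pvPart, hk, Bool.false_eq_true, if_false]
    rw [ih (k + 1) (cur ++ [c]) (by intro m h1 h2; apply h m (by omega) (by simp; omega))]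
    simp

theorem pvPart_split (starts : List Bool) :
    ∀ (xs : List Int) (k : Nat) (cur : List Int) (p : Nat),
      k ≤ p → p < k + xs.length → starts.getD p false = true →
      (∀ m, p < m → m < k + xs.length → starts.getD m false = false) →
      pvPart starts xs k cur = pvPart starts (xs.take (p - k)) k cur ++ [xs.drop (p - k)] := by
  intro xs
  induction xs with
  | nil => intro k cur p h1 h2 _ _; simp only [List.length_nil, Nat.add_zero] at h2; omega
  | cons c rest ih =>
    intro k cur p hkp hplen hmark hnone
    rcases Nat.eq_or_lt_of_le hkp with heq | hlt
    · subst heq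
      simp only [pvPart, hmark, if_true, Nat.sub_self, List.take_zero, List.drop_zero]
      rw [pvPart_no_marks starts rest (k + 1) [c] (by intro m h1 h2; apply hnone m (by omega) (by simp; omega))]
      simp
    · have hd : p - k = (p - (k + 1)) + 1 := by omega
      rw [hd, List.take_succ_cons, List.drop_succ_cons]
      by_cases hsk : starts.getD k false
      · simp only [pvPart, hsk, if_true]
        rw [ih (k + 1) [c] p (by omega) (by simp at hplen ⊢; omega) hmark
          (by intro m h1 h2; apply hnone m h1 (by simp at h2 ⊢; omega))]
        simp
      · simp only [pvPart, hsk, Bool.false_eq_true, if_false]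
        rw [ih (k + 1) (cur ++ [c]) p (by omega) (by simp at hplen ⊢; omega) hmark
          (by intro m h1 h2; apply hnone m h1 (by simp at h2 ⊢; omega))]

theorem pvSliceLow (xs : List Int) (i j : Int) (h : i = 0 ∨ i + (xs.length : Int) ≤ 0) (h2 : 0 ≤ j) :
    PySem.List.slice xs (some i) (some j) = xs.take j.toNat := by
  simp only [PySem.List.slice, PySem.List.clampIdx]
  split_ifs with h1 h2' h3 <;> try omega
  · rw [Nat.sub_zero, List.drop_zero, ← List.take_eq_take_min]
  · rw [show ((xs.length : Int) + i).toNat = 0 from by omega, Nat.sub_zero, List.drop_zero,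
      ← List.take_eq_take_min]
  · rw [show min i.toNat xs.length = 0 from by omega, Nat.sub_zero, List.drop_zero,
      ← List.take_eq_take_min]

theorem pvSliceMid (xs : List Int) (i j : Int) (h0 : 0 ≤ i) (h1 : i ≤ j) :
    PySem.List.slice xs (some i) (some j) = (xs.take j.toNat).drop i.toNat := by
  rw [PySem.List.slice_toNat (ha := h0) (hb := by omega), List.drop_take]

theorem pvMain (P : List Int) (cust : List Int) (hp : pvHP P cust.length) :
    ∀ (fuel : Nat) (j : Int) (starts : List Bool),
      0 < j → j ≤ (cust.length : Int) → j ≤ (fuel : Int) →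
      (∀ k : Nat, k < j.toNat → (starts.getD k false = true ↔ k ∈ pvPosChain P j (fuel + 1))) →
      extract_vrp_solution_go P cust j (fuel + 1) = (pvPart starts (cust.take j.toNat) 0 []).reverse := by
  intro fuel
  induction fuel with
  | zero => intro j starts hj _ hf _; omega
  | succ fuel ih =>
    intro j starts hj hjn hf hm
    obtain ⟨i, hget, hilt, hisign⟩ := hp j hj hjn
    by_cases hi : 0 < i
    · have hij : i.toNat < j.toNat := by omega
      have hmem : i.toNat ∈ pvPosChain P j (fuel + 1 + 1) := by
        simp only [pvPosChain, if_pos hj, hget]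
        apply List.mem_cons_of_mem
        rw [if_pos hi]
        exact List.mem_cons_self ..
      have hmi : starts.getD i.toNat false = true := (hm i.toNat hij).2 hmem
      have hnone : ∀ m, i.toNat < m → m < 0 + (cust.take j.toNat).length → starts.getD m false = false := by
        intro m h1 h2
        have hmlt : m < j.toNat := by
          simp only [List.length_take, Nat.zero_add] at h2
          omega
        by_contra hc
        have hcm : m ∈ pvPosChain P j (fuel + 1 + 1) :=
          (hm m hmlt).1 (by revert hc; cases starts.getD m false <;> simp)
        simp only [pvPosChain, if_pos hj, hget] at hcm
        rcases List.mem_cons.1 hcm with hh | hh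
        · omega
        · have := pvChainBound P cust.length hp (fuel + 1) i hi (by omega) m hh
          omega
      have hsplit := pvPart_split starts (cust.take j.toNat) 0 [] i.toNat (Nat.zero_le _)
        (by simp only [List.length_take, Nat.zero_add]; omega) hmi hnone
      have hgo : extract_vrp_solution_go P cust j (fuel + 1 + 1)
          = PySem.List.slice cust (some i) (some j) :: extract_vrp_solution_go P cust i (fuel + 1) := by
        simp [extract_vrp_solution_go, hj, hget]
      rw [hgo, pvSliceMid cust i j (by omega) (by omega), hsplit, Nat.sub_zero, List.take_take,
        Nat.min_eq_left (by omega : i.toNat ≤ j.toNat)]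
      rw [ih i starts hi (by omega) (by omega) (by
        intro k hk
        rw [hm k (by omega)]
        constructor
        · intro hh
          simp only [pvPosChain, if_pos hj, hget] at hh
          rcases List.mem_cons.1 hh with hh | hh
          · omega
          · exact hh
        · intro hh
          simp only [pvPosChain, if_pos hj, hget]
          exact List.mem_cons_of_mem _ hh)]
      simp
    · have hgo : extract_vrp_solution_go P cust j (fuel + 1 + 1)
          = [PySem.List.slice cust (some i) (some j)] := by
        simp [extract_vrp_solution_go, hj, hget, hi]
      have hnone : ∀ m, 0 ≤ m → m < 0 + (cust.take j.toNat).length → starts.getD m false = false := by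
        intro m _ h2
        have hmlt : m < j.toNat := by
          simp only [List.length_take, Nat.zero_add] at h2
          omega
        by_contra hc
        have hcm : m ∈ pvPosChain P j (fuel + 1 + 1) :=
          (hm m hmlt).1 (by revert hc; cases starts.getD m false <;> simp)
        simp only [pvPosChain, if_pos hj, hget] at hcm
        rw [if_neg hi] at hcm
        simp at hcm
        omega
      rw [hgo, pvPart_no_marks starts (cust.take j.toNat) 0 [] hnone,
        pvSliceLow cust i j (by omega) (by omega)]
      simp

-- ===== VERDICT (by name: the statement is the Claim_ definition above) =====
theorem extract_vrp_solution_spec : Claim_equal_extract_vrp_solution := by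
  unfold Claim_equal_extract_vrp_solution
  intro P cust _ hpre
  unfold Spec_extract_vrp_solution
  by_cases hemp : cust = []
  · subst hemp
    simp [extract_vrp_solution, extract_vrp_solution_go, extract_vrp_solution_alt]
  · have hne : cust.length ≠ 0 := by simpa [List.length_eq_zero_iff] using hemp
    rcases hpre with h | ⟨hlen, hall⟩
    · exact absurd h hemp
    have hp : pvHP P cust.length := by
      intro k hk hkn
      obtain ⟨h1, h2⟩ := hall k.toNat (by simp [List.mem_range]; omega) (by omega)
      refine ⟨P.getD k.toNat 0, ?_, by omega, by omega⟩
      rw [PySem.List.pyGet?_of_nonneg (h := by omega)]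
      have hkP : k.toNat < P.length := by omega
      rw [List.getElem?_eq_getElem hkP, List.getD_eq_getElem P 0 hkP]
    obtain ⟨j0, hget, hjlt, hjsign⟩ := hp (cust.length : Int) (by omega) (le_refl _)
    have hchainlt : ∀ m ∈ pvPosChain P j0 cust.length, m < (List.replicate cust.length false).length := by
      intro m hm
      rw [List.length_replicate]
      by_cases hj0 : 0 < j0
      · have := pvChainBound P cust.length hp cust.length j0 hj0 (by omega) m hm
        omega
      · rw [pvPosChain_nonpos P j0 cust.length (by omega)] at hm
        simp at hm
    have hmarks := pvMarkGo_getD P cust.length j0 (List.replicate cust.length false) hchainlt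
    have hmain := pvMain P cust hp cust.length (cust.length : Int)
      (pvMarkGo P (List.replicate cust.length false) j0 cust.length)
      (by omega) (le_refl _) (le_refl _) (by
        intro k hk
        have hcl : (0 : Int) < (cust.length : Int) := by omega
        have hiff : k ∈ pvPosChain P j0 cust.length
            ↔ k ∈ pvPosChain P (cust.length : Int) (cust.length + 1) := by
          simp only [pvPosChain, if_pos hcl, hget, Int.toNat_natCast]
          constructor
          · intro hh; exact List.mem_cons_of_mem _ hh
          · intro hh
            rcases List.mem_cons.1 hh with hh | hh
            · omega
            · exact hh
        rw [hmarks k]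
        simp [List.getD_eq_getElem?_getD, hiff])
    rw [show extract_vrp_solution P cust = extract_vrp_solution_go P cust (cust.length : Int) (cust.length + 1) from rfl,
      hmain, Int.toNat_natCast, List.take_length]
    simp only [extract_vrp_solution_alt, if_neg hne, hget]
    rw [pvPartGo_eq_part, List.nil_append]
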